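-- pv_equiv track=rewrite | github.com/tmay88/parcelDataParsing | removePredir_050923.py | removePredir
-- ===== SOURCE A (Python) =====
-- def removePredir(address):
--     directionals = {
--         'S W ': 4,
--         'N W ': 4,
--         'S E ': 4,
--         'N E ': 4,
--         'S ': 2,
--         'S.': 2,
--         'N ': 2,
--         'N.': 2,
--         'W ': 2,
--         'W.': 2,
--         'E ': 2,
--         'E.': 2,
--         'SW ': 3,
--         'NW ': 3,
--         'SE ': 3,
--         'NE ': 3,
--         'SOUTH ': 6,
--         'NORTH ': 6,
--         'WEST ': 5,
--         'EAST ': 5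
--     }
--     for key, value in directionals.items():
--         if address.startswith(key):
--             return address[value:]
--     return address
-- ===== SOURCE B (Python) =====
-- def removePredir(address):
--     # Decision tree on the leading characters instead of scanning a 20-key table.
--     c = address[:1]
--     if c == 'S' or c == 'N':
--         nxt = address[1:2]
--         if nxt == ' ' or nxt == '.':
--             if address[1:4] == ' W ' or address[1:4] == ' E ':
--                 return address[4:]
--             return address[2:]
--         if address[1:3] == 'W ' or address[1:3] == 'E ':
--             return address[3:]
--         if address[:6] == 'SOUTH ' or address[:6] == 'NORTH ':
--             return address[6:]
--         return address
--     if c == 'W' or c == 'E':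
--         nxt = address[1:2]
--         if nxt == ' ' or nxt == '.':
--             return address[2:]
--         if address[:5] == 'WEST ' or address[:5] == 'EAST ':
--             return address[5:]
--         return address
--     return address
-- ===== Notes on version B (the rewrite author's own statement) =====
-- stated objective: alternative
-- what changed: Replaces A's linear scan of a 20-key directional table (startswith per key) with a decision tree that inspects the first one or two characters and only then compares the few possible longer prefixes.
import Mathlib
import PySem

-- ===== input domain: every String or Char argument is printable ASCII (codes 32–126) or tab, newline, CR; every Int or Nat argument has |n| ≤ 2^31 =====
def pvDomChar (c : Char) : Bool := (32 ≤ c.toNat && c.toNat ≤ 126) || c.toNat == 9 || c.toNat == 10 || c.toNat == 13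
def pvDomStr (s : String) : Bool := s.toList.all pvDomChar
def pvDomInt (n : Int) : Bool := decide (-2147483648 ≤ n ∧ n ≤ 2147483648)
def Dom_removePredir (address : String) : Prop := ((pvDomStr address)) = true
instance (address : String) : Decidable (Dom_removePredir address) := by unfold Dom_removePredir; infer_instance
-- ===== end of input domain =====

-- B replaces A's 20-key table scan by a decision tree on the first characters (objective: simpler/alternative).

-- ===== PORT A =====
-- the 'for key, value in directionals.items():' loop
def removePredirLoop (address : String) : List (String × Int) → String
  | [] => address
  | (k, v) :: rest =>
    if PySem.Str.startswith address k then PySem.Str.slice address (some v) none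
    else removePredirLoop address rest

def removePredir (address : String) : String :=
  removePredirLoop address
    [("S W ", 4), ("N W ", 4), ("S E ", 4), ("N E ", 4),
     ("S ", 2), ("S.", 2), ("N ", 2), ("N.", 2),
     ("W ", 2), ("W.", 2), ("E ", 2), ("E.", 2),
     ("SW ", 3), ("NW ", 3), ("SE ", 3), ("NE ", 3),
     ("SOUTH ", 6), ("NORTH ", 6), ("WEST ", 5), ("EAST ", 5)]

-- ===== PORT B =====
def removePredir_alt (address : String) : String :=
  let c := PySem.Str.slice address none (some 1)
  if c = "S" ∨ c = "N" then
    let nxt := PySem.Str.slice address (some 1) (some 2)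
    if nxt = " " ∨ nxt = "." then
      if PySem.Str.slice address (some 1) (some 4) = " W " ∨
         PySem.Str.slice address (some 1) (some 4) = " E " then
        PySem.Str.slice address (some 4) none
      else PySem.Str.slice address (some 2) none
    else if PySem.Str.slice address (some 1) (some 3) = "W " ∨
            PySem.Str.slice address (some 1) (some 3) = "E " then
      PySem.Str.slice address (some 3) none
    else if PySem.Str.slice address none (some 6) = "SOUTH " ∨
            PySem.Str.slice address none (some 6) = "NORTH " then
      PySem.Str.slice address (some 6) none
    else address
  else if c = "W" ∨ c = "E" then
    let nxt := PySem.Str.slice address (some 1) (some 2)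
    if nxt = " " ∨ nxt = "." then
      PySem.Str.slice address (some 2) none
    else if PySem.Str.slice address none (some 5) = "WEST " ∨
            PySem.Str.slice address none (some 5) = "EAST " then
      PySem.Str.slice address (some 5) none
    else address
  else address

-- ===== PRECONDITION & SPEC =====
def Spec_removePredir (address : String) (out : String) : Prop := out = removePredir_alt address
instance (address : String) (out : String) : Decidable (Spec_removePredir address out) := by unfold Spec_removePredir; infer_instance

-- ===== CLAIM (what is proved, stated in full; the proofs are below) =====
def Claim_equal_removePredir : Prop := ∀ (address : String), Dom_removePredir address → Spec_removePredir address (removePredir address)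

-- ===== LEMMAS AND PROOFS =====

-- list-level image of port A (conditions stated as take-equalities)
def fA (l : List Char) : List Char :=
  if l.take 4 = ['S',' ','W',' '] then l.drop 4
  else if l.take 4 = ['N',' ','W',' '] then l.drop 4
  else if l.take 4 = ['S',' ','E',' '] then l.drop 4
  else if l.take 4 = ['N',' ','E',' '] then l.drop 4
  else if l.take 2 = ['S',' '] then l.drop 2
  else if l.take 2 = ['S','.'] then l.drop 2
  else if l.take 2 = ['N',' '] then l.drop 2
  else if l.take 2 = ['N','.'] then l.drop 2
  else if l.take 2 = ['W',' '] then l.drop 2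
  else if l.take 2 = ['W','.'] then l.drop 2
  else if l.take 2 = ['E',' '] then l.drop 2
  else if l.take 2 = ['E','.'] then l.drop 2
  else if l.take 3 = ['S','W',' '] then l.drop 3
  else if l.take 3 = ['N','W',' '] then l.drop 3
  else if l.take 3 = ['S','E',' '] then l.drop 3
  else if l.take 3 = ['N','E',' '] then l.drop 3
  else if l.take 6 = ['S','O','U','T','H',' '] then l.drop 6
  else if l.take 6 = ['N','O','R','T','H',' '] then l.drop 6
  else if l.take 5 = ['W','E','S','T',' '] then l.drop 5
  else if l.take 5 = ['E','A','S','T',' '] then l.drop 5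
  else l

-- list-level image of port B
def fB (l : List Char) : List Char :=
  if l.take 1 = ['S'] ∨ l.take 1 = ['N'] then
    if (l.drop 1).take 1 = [' '] ∨ (l.drop 1).take 1 = ['.'] then
      if (l.drop 1).take 3 = [' ','W',' '] ∨ (l.drop 1).take 3 = [' ','E',' '] then l.drop 4
      else l.drop 2
    else if (l.drop 1).take 2 = ['W',' '] ∨ (l.drop 1).take 2 = ['E',' '] then l.drop 3
    else if l.take 6 = ['S','O','U','T','H',' '] ∨ l.take 6 = ['N','O','R','T','H',' '] then l.drop 6
    else l
  else if l.take 1 = ['W'] ∨ l.take 1 = ['E'] then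
    if (l.drop 1).take 1 = [' '] ∨ (l.drop 1).take 1 = ['.'] then l.drop 2
    else if l.take 5 = ['W','E','S','T',' '] ∨ l.take 5 = ['E','A','S','T',' '] then l.drop 5
    else l
  else l

-- A's startswith test, as a take-equality (exact: prefix ↔ take of the prefix's length)
theorem startswith_take (l p : List Char) :
    (PySem.Chars.startswith l p = true) ↔ l.take p.length = p := by
  rw [PySem.Chars.startswith_iff]
  constructor
  · intro h; exact (List.prefix_iff_eq_take.mp h).symm
  · intro h; exact List.prefix_iff_eq_take.mpr h.symm


set_option maxHeartbeats 4000000 in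
theorem removePredir_toList (address : String) :
    (removePredir address).toList = fA address.toList := by
  unfold removePredir fA
  simp only [removePredirLoop, apply_ite String.toList, PySem.Str.toList_slice,
    PySem.Str.startswith_eq, PySem.Chars.slice_eq_listSlice]
  simp [pysem, startswith_take]

set_option maxHeartbeats 4000000 in
theorem removePredir_alt_toList (address : String) :
    (removePredir_alt address).toList = fB address.toList := by
  unfold removePredir_alt fB
  simp only [apply_ite String.toList, PySem.Str.toList_slice, PySem.Chars.slice_eq_listSlice,
    ← String.toList_inj, PySem.Str.toList_slice]
  simp [pysem]

theorem listEq0 : fA [] = fB [] := by decide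

theorem listEq1 (a : Char) : fA [a] = fB [a] := by
  unfold fA fB
  simp only [List.take_succ_cons, List.drop_succ_cons, List.take_zero, List.take_nil,
    List.drop_nil, List.cons.injEq, and_true]
  split_ifs <;> first | rfl | tauto | simp_all

theorem listEq2 (a b : Char) :
    fA ([a, b]) = fB ([a, b]) := by
  unfold fA fB
  simp only [List.take_succ_cons, List.drop_succ_cons, List.take_zero, List.take_nil,
    List.drop_nil, List.cons.injEq, and_true]
  by_cases ha0 : a = 'S'
  · subst ha0; try simp
    by_cases hb0 : b = ' '
    · subst hb0; try simp
      all_goals (split_ifs <;> first | rfl | tauto | simp_all)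
    · by_cases hb1 : b = '.'
      · subst hb1; try simp
        all_goals (split_ifs <;> first | rfl | tauto | simp_all)
      · by_cases hb2 : b = 'W'
        · subst hb2; try simp
          all_goals (split_ifs <;> first | rfl | tauto | simp_all)
        · by_cases hb3 : b = 'E'
          · subst hb3; try simp
            all_goals (split_ifs <;> first | rfl | tauto | simp_all)
          · by_cases hb4 : b = 'O'
            · subst hb4; try simp
              all_goals (split_ifs <;> first | rfl | tauto | simp_all)
            · simp [hb0, hb1, hb2, hb3, hb4]
  · by_cases ha1 : a = 'N'
    · subst ha1; try simp
      by_cases hb0 : b = ' '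
      · subst hb0; try simp
        all_goals (split_ifs <;> first | rfl | tauto | simp_all)
      · by_cases hb1 : b = '.'
        · subst hb1; try simp
          all_goals (split_ifs <;> first | rfl | tauto | simp_all)
        · by_cases hb2 : b = 'W'
          · subst hb2; try simp
            all_goals (split_ifs <;> first | rfl | tauto | simp_all)
          · by_cases hb3 : b = 'E'
            · subst hb3; try simp
              all_goals (split_ifs <;> first | rfl | tauto | simp_all)
            · by_cases hb4 : b = 'O'
              · subst hb4; try simp
                all_goals (split_ifs <;> first | rfl | tauto | simp_all)
              · simp [hb0, hb1, hb2, hb3, hb4]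
    · by_cases ha2 : a = 'W'
      · subst ha2; try simp
        by_cases hb0 : b = ' '
        · subst hb0; try simp
          all_goals (split_ifs <;> first | rfl | tauto | simp_all)
        · by_cases hb1 : b = '.'
          · subst hb1; try simp
            all_goals (split_ifs <;> first | rfl | tauto | simp_all)
          · by_cases hb2 : b = 'E'
            · subst hb2; try simp
              all_goals (split_ifs <;> first | rfl | tauto | simp_all)
            · simp [hb0, hb1, hb2]
      · by_cases ha3 : a = 'E'
        · subst ha3; try simp
          by_cases hb0 : b = ' '
          · subst hb0; try simp
            all_goals (split_ifs <;> first | rfl | tauto | simp_all)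
          · by_cases hb1 : b = '.'
            · subst hb1; try simp
              all_goals (split_ifs <;> first | rfl | tauto | simp_all)
            · by_cases hb2 : b = 'A'
              · subst hb2; try simp
                all_goals (split_ifs <;> first | rfl | tauto | simp_all)
              · simp [hb0, hb1, hb2]
        · simp [ha0, ha1, ha2, ha3]

theorem listEq3 (a b c : Char) :
    fA ([a, b, c]) = fB ([a, b, c]) := by
  unfold fA fB
  simp only [List.take_succ_cons, List.drop_succ_cons, List.take_zero, List.take_nil,
    List.drop_nil, List.cons.injEq, and_true]
  by_cases ha0 : a = 'S'
  · subst ha0; try simp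
    by_cases hb0 : b = ' '
    · subst hb0; try simp
      all_goals (split_ifs <;> first | rfl | tauto | simp_all)
    · by_cases hb1 : b = '.'
      · subst hb1; try simp
        all_goals (split_ifs <;> first | rfl | tauto | simp_all)
      · by_cases hb2 : b = 'W'
        · subst hb2; try simp
          all_goals (split_ifs <;> first | rfl | tauto | simp_all)
        · by_cases hb3 : b = 'E'
          · subst hb3; try simp
            all_goals (split_ifs <;> first | rfl | tauto | simp_all)
          · by_cases hb4 : b = 'O'
            · subst hb4; try simp
              all_goals (split_ifs <;> first | rfl | tauto | simp_all)
            · simp [hb0, hb1, hb2, hb3, hb4]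
  · by_cases ha1 : a = 'N'
    · subst ha1; try simp
      by_cases hb0 : b = ' '
      · subst hb0; try simp
        all_goals (split_ifs <;> first | rfl | tauto | simp_all)
      · by_cases hb1 : b = '.'
        · subst hb1; try simp
          all_goals (split_ifs <;> first | rfl | tauto | simp_all)
        · by_cases hb2 : b = 'W'
          · subst hb2; try simp
            all_goals (split_ifs <;> first | rfl | tauto | simp_all)
          · by_cases hb3 : b = 'E'
            · subst hb3; try simp
              all_goals (split_ifs <;> first | rfl | tauto | simp_all)
            · by_cases hb4 : b = 'O'
              · subst hb4; try simp
                all_goals (split_ifs <;> first | rfl | tauto | simp_all)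
              · simp [hb0, hb1, hb2, hb3, hb4]
    · by_cases ha2 : a = 'W'
      · subst ha2; try simp
        by_cases hb0 : b = ' '
        · subst hb0; try simp
          all_goals (split_ifs <;> first | rfl | tauto | simp_all)
        · by_cases hb1 : b = '.'
          · subst hb1; try simp
            all_goals (split_ifs <;> first | rfl | tauto | simp_all)
          · by_cases hb2 : b = 'E'
            · subst hb2; try simp
              all_goals (split_ifs <;> first | rfl | tauto | simp_all)
            · simp [hb0, hb1, hb2]
      · by_cases ha3 : a = 'E'
        · subst ha3; try simp
          by_cases hb0 : b = ' '
          · subst hb0; try simp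
            all_goals (split_ifs <;> first | rfl | tauto | simp_all)
          · by_cases hb1 : b = '.'
            · subst hb1; try simp
              all_goals (split_ifs <;> first | rfl | tauto | simp_all)
            · by_cases hb2 : b = 'A'
              · subst hb2; try simp
                all_goals (split_ifs <;> first | rfl | tauto | simp_all)
              · simp [hb0, hb1, hb2]
        · simp [ha0, ha1, ha2, ha3]

theorem listEq4 (a b c d : Char) :
    fA ([a, b, c, d]) = fB ([a, b, c, d]) := by
  unfold fA fB
  simp only [List.take_succ_cons, List.drop_succ_cons, List.take_zero, List.take_nil,
    List.drop_nil, List.cons.injEq, and_true]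
  by_cases ha0 : a = 'S'
  · subst ha0; try simp
    by_cases hb0 : b = ' '
    · subst hb0; try simp
      all_goals (split_ifs <;> first | rfl | tauto | simp_all)
    · by_cases hb1 : b = '.'
      · subst hb1; try simp
        all_goals (split_ifs <;> first | rfl | tauto | simp_all)
      · by_cases hb2 : b = 'W'
        · subst hb2; try simp
          all_goals (split_ifs <;> first | rfl | tauto | simp_all)
        · by_cases hb3 : b = 'E'
          · subst hb3; try simp
            all_goals (split_ifs <;> first | rfl | tauto | simp_all)
          · by_cases hb4 : b = 'O'
            · subst hb4; try simp
              all_goals (split_ifs <;> first | rfl | tauto | simp_all)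
            · simp [hb0, hb1, hb2, hb3, hb4]
  · by_cases ha1 : a = 'N'
    · subst ha1; try simp
      by_cases hb0 : b = ' '
      · subst hb0; try simp
        all_goals (split_ifs <;> first | rfl | tauto | simp_all)
      · by_cases hb1 : b = '.'
        · subst hb1; try simp
          all_goals (split_ifs <;> first | rfl | tauto | simp_all)
        · by_cases hb2 : b = 'W'
          · subst hb2; try simp
            all_goals (split_ifs <;> first | rfl | tauto | simp_all)
          · by_cases hb3 : b = 'E'
            · subst hb3; try simp
              all_goals (split_ifs <;> first | rfl | tauto | simp_all)
            · by_cases hb4 : b = 'O'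
              · subst hb4; try simp
                all_goals (split_ifs <;> first | rfl | tauto | simp_all)
              · simp [hb0, hb1, hb2, hb3, hb4]
    · by_cases ha2 : a = 'W'
      · subst ha2; try simp
        by_cases hb0 : b = ' '
        · subst hb0; try simp
          all_goals (split_ifs <;> first | rfl | tauto | simp_all)
        · by_cases hb1 : b = '.'
          · subst hb1; try simp
            all_goals (split_ifs <;> first | rfl | tauto | simp_all)
          · by_cases hb2 : b = 'E'
            · subst hb2; try simp
              all_goals (split_ifs <;> first | rfl | tauto | simp_all)
            · simp [hb0, hb1, hb2]
      · by_cases ha3 : a = 'E'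
        · subst ha3; try simp
          by_cases hb0 : b = ' '
          · subst hb0; try simp
            all_goals (split_ifs <;> first | rfl | tauto | simp_all)
          · by_cases hb1 : b = '.'
            · subst hb1; try simp
              all_goals (split_ifs <;> first | rfl | tauto | simp_all)
            · by_cases hb2 : b = 'A'
              · subst hb2; try simp
                all_goals (split_ifs <;> first | rfl | tauto | simp_all)
              · simp [hb0, hb1, hb2]
        · simp [ha0, ha1, ha2, ha3]

theorem listEq5 (a b c d e : Char) :
    fA ([a, b, c, d, e]) = fB ([a, b, c, d, e]) := by
  unfold fA fB
  simp only [List.take_succ_cons, List.drop_succ_cons, List.take_zero, List.take_nil,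
    List.drop_nil, List.cons.injEq, and_true]
  by_cases ha0 : a = 'S'
  · subst ha0; try simp
    by_cases hb0 : b = ' '
    · subst hb0; try simp
      all_goals (split_ifs <;> first | rfl | tauto | simp_all)
    · by_cases hb1 : b = '.'
      · subst hb1; try simp
        all_goals (split_ifs <;> first | rfl | tauto | simp_all)
      · by_cases hb2 : b = 'W'
        · subst hb2; try simp
          all_goals (split_ifs <;> first | rfl | tauto | simp_all)
        · by_cases hb3 : b = 'E'
          · subst hb3; try simp
            all_goals (split_ifs <;> first | rfl | tauto | simp_all)
          · by_cases hb4 : b = 'O'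
            · subst hb4; try simp
              all_goals (split_ifs <;> first | rfl | tauto | simp_all)
            · simp [hb0, hb1, hb2, hb3, hb4]
  · by_cases ha1 : a = 'N'
    · subst ha1; try simp
      by_cases hb0 : b = ' '
      · subst hb0; try simp
        all_goals (split_ifs <;> first | rfl | tauto | simp_all)
      · by_cases hb1 : b = '.'
        · subst hb1; try simp
          all_goals (split_ifs <;> first | rfl | tauto | simp_all)
        · by_cases hb2 : b = 'W'
          · subst hb2; try simp
            all_goals (split_ifs <;> first | rfl | tauto | simp_all)
          · by_cases hb3 : b = 'E'
            · subst hb3; try simp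
              all_goals (split_ifs <;> first | rfl | tauto | simp_all)
            · by_cases hb4 : b = 'O'
              · subst hb4; try simp
                all_goals (split_ifs <;> first | rfl | tauto | simp_all)
              · simp [hb0, hb1, hb2, hb3, hb4]
    · by_cases ha2 : a = 'W'
      · subst ha2; try simp
        by_cases hb0 : b = ' '
        · subst hb0; try simp
          all_goals (split_ifs <;> first | rfl | tauto | simp_all)
        · by_cases hb1 : b = '.'
          · subst hb1; try simp
            all_goals (split_ifs <;> first | rfl | tauto | simp_all)
          · by_cases hb2 : b = 'E'
            · subst hb2; try simp
              all_goals (split_ifs <;> first | rfl | tauto | simp_all)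
            · simp [hb0, hb1, hb2]
      · by_cases ha3 : a = 'E'
        · subst ha3; try simp
          by_cases hb0 : b = ' '
          · subst hb0; try simp
            all_goals (split_ifs <;> first | rfl | tauto | simp_all)
          · by_cases hb1 : b = '.'
            · subst hb1; try simp
              all_goals (split_ifs <;> first | rfl | tauto | simp_all)
            · by_cases hb2 : b = 'A'
              · subst hb2; try simp
                all_goals (split_ifs <;> first | rfl | tauto | simp_all)
              · simp [hb0, hb1, hb2]
        · simp [ha0, ha1, ha2, ha3]

theorem listEqLong (a b c d e f : Char) (rest : List Char) :
    fA (a :: b :: c :: d :: e :: f :: rest) = fB (a :: b :: c :: d :: e :: f :: rest) := by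
  unfold fA fB
  simp only [List.take_succ_cons, List.drop_succ_cons, List.take_zero, List.take_nil,
    List.drop_nil, List.cons.injEq, and_true]
  by_cases ha0 : a = 'S'
  · subst ha0; try simp
    by_cases hb0 : b = ' '
    · subst hb0; try simp
      all_goals (split_ifs <;> first | rfl | tauto | simp_all)
    · by_cases hb1 : b = '.'
      · subst hb1; try simp
        all_goals (split_ifs <;> first | rfl | tauto | simp_all)
      · by_cases hb2 : b = 'W'
        · subst hb2; try simp
          all_goals (split_ifs <;> first | rfl | tauto | simp_all)
        · by_cases hb3 : b = 'E'
          · subst hb3; try simp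
            all_goals (split_ifs <;> first | rfl | tauto | simp_all)
          · by_cases hb4 : b = 'O'
            · subst hb4; try simp
              all_goals (split_ifs <;> first | rfl | tauto | simp_all)
            · simp [hb0, hb1, hb2, hb3, hb4]
  · by_cases ha1 : a = 'N'
    · subst ha1; try simp
      by_cases hb0 : b = ' '
      · subst hb0; try simp
        all_goals (split_ifs <;> first | rfl | tauto | simp_all)
      · by_cases hb1 : b = '.'
        · subst hb1; try simp
          all_goals (split_ifs <;> first | rfl | tauto | simp_all)
        · by_cases hb2 : b = 'W'
          · subst hb2; try simp
            all_goals (split_ifs <;> first | rfl | tauto | simp_all)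
          · by_cases hb3 : b = 'E'
            · subst hb3; try simp
              all_goals (split_ifs <;> first | rfl | tauto | simp_all)
            · by_cases hb4 : b = 'O'
              · subst hb4; try simp
                all_goals (split_ifs <;> first | rfl | tauto | simp_all)
              · simp [hb0, hb1, hb2, hb3, hb4]
    · by_cases ha2 : a = 'W'
      · subst ha2; try simp
        by_cases hb0 : b = ' '
        · subst hb0; try simp
          all_goals (split_ifs <;> first | rfl | tauto | simp_all)
        · by_cases hb1 : b = '.'
          · subst hb1; try simp
            all_goals (split_ifs <;> first | rfl | tauto | simp_all)
          · by_cases hb2 : b = 'E'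
            · subst hb2; try simp
              all_goals (split_ifs <;> first | rfl | tauto | simp_all)
            · simp [hb0, hb1, hb2]
      · by_cases ha3 : a = 'E'
        · subst ha3; try simp
          by_cases hb0 : b = ' '
          · subst hb0; try simp
            all_goals (split_ifs <;> first | rfl | tauto | simp_all)
          · by_cases hb1 : b = '.'
            · subst hb1; try simp
              all_goals (split_ifs <;> first | rfl | tauto | simp_all)
            · by_cases hb2 : b = 'A'
              · subst hb2; try simp
                all_goals (split_ifs <;> first | rfl | tauto | simp_all)
              · simp [hb0, hb1, hb2]
        · simp [ha0, ha1, ha2, ha3]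


theorem listEq (l : List Char) : fA l = fB l :=
  match l with
  | [] => listEq0
  | [a] => listEq1 a
  | [a, b] => listEq2 a b
  | [a, b, c] => listEq3 a b c
  | [a, b, c, d] => listEq4 a b c d
  | [a, b, c, d, e] => listEq5 a b c d e
  | a :: b :: c :: d :: e :: f :: rest => listEqLong a b c d e f rest

-- ===== VERDICT (by name: the statement is the Claim_ definition above) =====
theorem removePredir_spec : Claim_equal_removePredir := by
  intro address _
  unfold Spec_removePredir
  apply String.toList_inj.mp
  rw [removePredir_toList, removePredir_alt_toList, listEq]
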